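-- pv_equiv track=rewrite | github.com/uddalak2005/The-Third-Reich | agentguard/backend/tool_chain_analyzer.py | _matches_ordered_chain
-- ===== SOURCE A (Python) =====
-- from typing import Dict, List, Optional, Tuple
--
-- def _matches_ordered_chain(tools: List[str],
--                             keyword_groups: List[List[str]]) -> bool:
--     """
--     Check if tool list contains each keyword group in order.
--     Group 1 must appear before Group 2 in the session.
--     """
--     last_idx = -1
--     for group in keyword_groups:
--         found = False
--         for i, tool in enumerate(tools):
--             if i <= last_idx:
--                 continue
--             if any(kw in tool for kw in group):
--                 last_idx = i
--                 found    = True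
--                 break
--         if not found:
--             return False
--     return True
-- ===== SOURCE B (Python) =====
-- def _matches_ordered_chain(tools, keyword_groups):
--     """Single left-to-right pass over tools, advancing through the groups."""
--     remaining = keyword_groups
--     for tool in tools:
--         if remaining and any(kw in tool for kw in remaining[0]):
--             remaining = remaining[1:]
--     return not remaining
-- ===== Notes on version B (the rewrite author's own statement) =====
-- stated objective: alternative
-- what changed: Instead of restarting a scan over tools (skipping already-used indices) for every keyword group, B makes one linear pass over tools and advances through the group list on each first match.
import Mathlib
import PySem

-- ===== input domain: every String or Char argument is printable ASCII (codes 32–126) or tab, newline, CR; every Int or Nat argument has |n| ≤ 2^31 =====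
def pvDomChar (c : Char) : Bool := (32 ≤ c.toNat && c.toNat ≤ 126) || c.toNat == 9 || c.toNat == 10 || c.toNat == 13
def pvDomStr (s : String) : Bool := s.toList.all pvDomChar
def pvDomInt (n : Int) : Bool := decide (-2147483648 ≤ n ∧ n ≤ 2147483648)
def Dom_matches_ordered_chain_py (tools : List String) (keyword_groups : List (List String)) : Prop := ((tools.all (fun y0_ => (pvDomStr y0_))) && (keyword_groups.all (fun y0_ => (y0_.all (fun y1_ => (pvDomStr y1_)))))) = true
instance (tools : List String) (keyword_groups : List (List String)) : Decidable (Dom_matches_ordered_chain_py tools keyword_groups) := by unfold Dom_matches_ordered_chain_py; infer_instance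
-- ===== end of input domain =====

-- B replaces A's per-group rescan of the tool list by one linear pass advancing through the groups; proved to return the same Bool on every input.

-- 'any(kw in tool for kw in group)' (shared by both Pythons, written identically in each)
def pvGroupHit (group : List String) (tool : String) : Bool :=
  group.any (fun kw => PySem.Str.isIn kw tool)

-- ===== PORT A =====
-- inner 'for i, tool in enumerate(tools): if i <= last_idx: continue; if any(...): break'
def pvAInner (group : List String) : Nat → List String → Int → Option Nat
  | _, [], _ => none
  | i, tool :: ts, lastIdx =>
    if (i : Int) ≤ lastIdx then pvAInner group (i + 1) ts lastIdx
    else if pvGroupHit group tool then some i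
    else pvAInner group (i + 1) ts lastIdx

-- outer 'for group in keyword_groups'
def pvAGo (tools : List String) : List (List String) → Int → Bool
  | [], _ => true
  | g :: gs, lastIdx =>
    match pvAInner g 0 tools lastIdx with
    | none => false
    | some i => pvAGo tools gs (i : Int)

def matches_ordered_chain_py (tools : List String) (keyword_groups : List (List String)) : Bool :=
  pvAGo tools keyword_groups (-1)

-- ===== PORT B =====
-- 'for tool in tools: if remaining and any(...): remaining = remaining[1:]'
def pvBGo : List (List String) → List String → List (List String)
  | rem, [] => rem
  | rem, tool :: ts =>
    pvBGo (match rem with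
           | [] => []
           | g :: gs => if pvGroupHit g tool then gs else g :: gs) ts

def matches_ordered_chain_py_alt (tools : List String) (keyword_groups : List (List String)) : Bool :=
  (pvBGo keyword_groups tools).isEmpty

-- ===== PRECONDITION & SPEC =====
def Spec_matches_ordered_chain_py (tools : List String) (keyword_groups : List (List String)) (out : Bool) : Prop := out = matches_ordered_chain_py_alt tools keyword_groups
instance (tools : List String) (keyword_groups : List (List String)) (out : Bool) : Decidable (Spec_matches_ordered_chain_py tools keyword_groups out) := by unfold Spec_matches_ordered_chain_py; infer_instance

-- ===== CLAIM =====
def Claim_equal_matches_ordered_chain_py : Prop := ∀ (tools : List String) (keyword_groups : List (List String)), Dom_matches_ordered_chain_py tools keyword_groups → Spec_matches_ordered_chain_py tools keyword_groups (matches_ordered_chain_py tools keyword_groups)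

-- ===== LEMMAS AND PROOFS =====

-- scanning an empty group list changes nothing
theorem pvBGo_nil (ts : List String) : pvBGo [] ts = [] := by
  induction ts with
  | nil => rfl
  | cons t ts ih => simpa [pvBGo] using ih

-- skipping: indices ≤ lastIdx are skipped, so the scan starts at the suffix
theorem pvAInner_skip (group : List String) (d : Nat) :
    ∀ (ts : List String) (i : Nat),
      pvAInner group i ts ((i : Int) + d - 1) = pvAInner group (i + d) (ts.drop d) ((i : Int) + d - 1) := by
  induction d with
  | zero => intro ts i; simp
  | succ d ih =>
    intro ts i
    cases ts with
    | nil => simp [pvAInner]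
    | cons t ts =>
      have hle : (i : Int) ≤ (i : Int) + (d + 1 : Nat) - 1 := by push_cast; omega
      have h1 : ((i + 1 : Nat) : Int) + d - 1 = (i : Int) + (d + 1 : Nat) - 1 := by push_cast; omega
      calc pvAInner group i (t :: ts) ((i : Int) + (d + 1 : Nat) - 1)
          = pvAInner group (i + 1) ts ((i : Int) + (d + 1 : Nat) - 1) := by
            simp [pvAInner]
        _ = pvAInner group (i + 1 + d) (ts.drop d) ((i : Int) + (d + 1 : Nat) - 1) := by
            rw [← h1, ih ts (i + 1), h1]
        _ = pvAInner group (i + (d + 1)) ((t :: ts).drop (d + 1)) ((i : Int) + (d + 1 : Nat) - 1) := by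
            simp [List.drop_succ_cons]; ring_nf

-- once lastIdx is below every scanned index its exact value is irrelevant
theorem pvAInner_irrel (group : List String) :
    ∀ (ts : List String) (i : Nat) (l1 l2 : Int), l1 < (i : Int) → l2 < (i : Int) →
      pvAInner group i ts l1 = pvAInner group i ts l2 := by
  intro ts
  induction ts with
  | nil => intro i l1 l2 _ _; rfl
  | cons t ts ih =>
    intro i l1 l2 h1 h2
    have n1 : ¬ (i : Int) ≤ l1 := by omega
    have n2 : ¬ (i : Int) ≤ l2 := by omega
    simp only [pvAInner, n1, n2, if_false]
    split
    · rfl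
    · exact ih (i + 1) l1 l2 (by push_cast; omega) (by push_cast; omega)

-- heart of the equivalence: matching one group on the suffix, then recursing
theorem pvMain (tools : List String) :
    ∀ (gs : List (List String)) (k : Nat),
      pvAGo tools gs ((k : Int) - 1) = (pvBGo gs (tools.drop k)).isEmpty := by
  intro gs
  induction gs with
  | nil => intro k; simp [pvAGo, pvBGo_nil]
  | cons g gsRest ihOuter =>
    intro k
    have hskip := pvAInner_skip g k tools 0
    simp only [Nat.cast_zero, zero_add] at hskip
    show (match pvAInner g 0 tools ((k : Int) - 1) with
          | none => false
          | some i => pvAGo tools gsRest (i : Int)) = (pvBGo (g :: gsRest) (tools.drop k)).isEmpty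
    rw [hskip]
    -- inner induction on the suffix, tracking ts = tools.drop k
    suffices h : ∀ (ts : List String) (k : Nat), ts = tools.drop k →
        (match pvAInner g k ts ((k : Int) - 1) with
         | none => false
         | some i => pvAGo tools gsRest (i : Int)) = (pvBGo (g :: gsRest) ts).isEmpty by
      exact h (tools.drop k) k rfl
    intro ts
    induction ts with
    | nil =>
      intro k _
      simp [pvAInner, pvBGo]
    | cons t ts ihInner =>
      intro k hk
      have hdrop : ts = tools.drop (k + 1) := by
        have h1 : tools.drop (k + 1) = (tools.drop k).drop 1 := by
          rw [List.drop_drop]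
        rw [h1, ← hk]
        rfl
      have hnle : ¬ (k : Int) ≤ (k : Int) - 1 := by omega
      by_cases hhit : pvGroupHit g t
      · simp only [pvAInner, hnle, if_false, hhit, if_true]
        have : pvAGo tools gsRest (k : Int) = pvAGo tools gsRest (((k + 1 : Nat) : Int) - 1) := by
          push_cast; ring_nf
        rw [this, ihOuter (k + 1), ← hdrop]
        simp [pvBGo, hhit]
      · simp only [pvAInner, hnle, if_false, hhit, Bool.false_eq_true]
        have hirr : pvAInner g (k + 1) ts ((k : Int) - 1)
            = pvAInner g (k + 1) ts (((k + 1 : Nat) : Int) - 1) := by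
          exact pvAInner_irrel g ts (k + 1) _ _ (by push_cast; omega) (by push_cast; omega)
        rw [hirr, ihInner (k + 1) hdrop]
        simp [pvBGo, hhit]

-- ===== VERDICT =====
theorem matches_ordered_chain_py_spec : Claim_equal_matches_ordered_chain_py := by
  intro tools kgs _
  unfold Spec_matches_ordered_chain_py matches_ordered_chain_py matches_ordered_chain_py_alt
  have h := pvMain tools kgs 0
  simpa using h
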